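-- pv_equiv track=rewrite | github.com/marcotmotta/wiki-dragon-experience | migracao-wiki/converter.py | parse_template_params
-- ===== SOURCE A (Python) =====
-- def parse_template_params(body: str) -> dict[str, str]:
--     """Parse the body of {{Template|k=v|k=v|...}} into a dict.
--
--     Handles | inside [[...]] and {{...}} by tracking nesting depth.
--     Input is the content between outer {{ and }} without the template name.
--     """
--     params: dict[str, str] = {}
--     depth_br = 0  # [[ ]]
--     depth_tpl = 0  # {{ }}
--     current = []
--     parts: list[str] = []
--     i = 0
--     while i < len(body):
--         c = body[i]
--         two = body[i : i + 2]
--         if two == "[[":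
--             depth_br += 1
--             current.append(two); i += 2; continue
--         if two == "]]":
--             depth_br -= 1
--             current.append(two); i += 2; continue
--         if two == "{{":
--             depth_tpl += 1
--             current.append(two); i += 2; continue
--         if two == "}}":
--             depth_tpl -= 1
--             current.append(two); i += 2; continue
--         if c == "|" and depth_br == 0 and depth_tpl == 0:
--             parts.append("".join(current))
--             current = []
--             i += 1; continue
--         current.append(c); i += 1
--     if current:
--         parts.append("".join(current))
--
--     for part in parts:
--         if "=" not in part:
--             continue
--         k, v = part.split("=", 1)
--         params[k.strip()] = v.strip()
--     return params
-- ===== SOURCE B (Python) =====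
-- def parse_template_params(body: str) -> dict[str, str]:
--     """Split on every '|' first, then glue chunks back together while the
--     bracket/brace depth (computed per chunk via substring counts) is unbalanced;
--     finally parse each top-level part at its first '='."""
--     parts: list[str] = []
--     buf = None
--     depth_br = 0
--     depth_tpl = 0
--     for chunk in body.split("|"):
--         buf = chunk if buf is None else buf + "|" + chunk
--         depth_br += chunk.count("[[") - chunk.count("]]")
--         depth_tpl += chunk.count("{{") - chunk.count("}}")
--         if depth_br == 0 and depth_tpl == 0:
--             parts.append(buf)
--             buf = None
--     if buf is not None:
--         parts.append(buf)
--
--     params: dict[str, str] = {}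
--     for part in parts:
--         k, eq, v = part.partition("=")
--         if eq:
--             params[k.strip()] = v.strip()
--     return params
-- ===== Notes on version B (the rewrite author's own statement) =====
-- stated objective: faster
-- what changed: Replaced A's index-based character-by-character scan (two-char window, per-char depth updates, char accumulator) by a split-on-pipe pass that merges chunks back while the bracket/brace depths, obtained per chunk from substring counts of the four two-char delimiter tokens, are unbalanced; the equals-sign parse uses str.partition instead of an in-check plus split.
import Mathlib
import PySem

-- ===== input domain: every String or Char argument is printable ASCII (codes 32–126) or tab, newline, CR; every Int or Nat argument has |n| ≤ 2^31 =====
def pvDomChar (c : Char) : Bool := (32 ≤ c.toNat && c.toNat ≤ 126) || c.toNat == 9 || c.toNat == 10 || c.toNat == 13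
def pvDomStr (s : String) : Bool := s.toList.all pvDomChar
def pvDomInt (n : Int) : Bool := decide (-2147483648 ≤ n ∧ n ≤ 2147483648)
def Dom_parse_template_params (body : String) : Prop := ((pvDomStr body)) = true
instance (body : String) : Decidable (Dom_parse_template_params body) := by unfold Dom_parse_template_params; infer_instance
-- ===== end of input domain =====

-- B replaces A's character-by-character depth scan by a split-on-'|' pass that merges
-- chunks back while the substring-counted bracket depths are unbalanced (objective:
-- faster by a constant factor, measured; same exact dict).

-- ===== PORT A =====
-- A's while-loop: at index i it looks at two = body[i:i+2] and c = body[i], updates the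
-- two depths, and splits on top-level '|'; `current` (a list of fragments "".join-ed at
-- the end) is kept as the concatenated List Char, parts as List (List Char),
-- turned into Strings in the second pass.
def pvLoopA : List Char → Int → Int → List Char → List (List Char) → List (List Char)
  | [], _, _, cur, parts => if cur ≠ [] then parts ++ [cur] else parts
  | c :: r, br, tpl, cur, parts =>
    let two := c :: r.take 1
    if two = ['[', '['] then pvLoopA (r.drop 1) (br + 1) tpl (cur ++ two) parts
    else if two = [']', ']'] then pvLoopA (r.drop 1) (br - 1) tpl (cur ++ two) parts
    else if two = ['{', '{'] then pvLoopA (r.drop 1) br (tpl + 1) (cur ++ two) parts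
    else if two = ['}', '}'] then pvLoopA (r.drop 1) br (tpl - 1) (cur ++ two) parts
    else if c = '|' ∧ br = 0 ∧ tpl = 0 then pvLoopA r br tpl [] (parts ++ [cur])
    else pvLoopA r br tpl (cur ++ [c]) parts
  termination_by cs _ _ _ _ => cs.length
  decreasing_by all_goals (simp; try omega)

def parse_template_params (body : String) : List (String × String) :=
  let parts := pvLoopA body.toList 0 0 [] []
  (parts.foldl (fun (d : PySem.Dict String String) part =>
      if PySem.Chars.isIn ['='] part = false then d      -- "=" not in part: continue
      else
        match PySem.Chars.splitOnMax part ['='] 1 with   -- k, v = part.split("=", 1)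
        | [k, v] => d.insert (String.ofList (PySem.Chars.strip k)) (String.ofList (PySem.Chars.strip v))
        | _ => d                                          -- unreachable: split yields 2 pieces here
    ) PySem.Dict.empty).items

-- ===== PORT B =====
-- Source B: fold over body.split("|") with state (buf, depth_br, depth_tpl, parts), depth
-- deltas by str.count of the bracket pairs; str.partition("=") is hand-ported for the
-- 1-char separator "=" as takeWhile/dropWhile at the first '=' (exact: partition
-- splits at the first occurrence of the separator).
def parse_template_params_alt (body : String) : List (String × String) :=
  let st := (PySem.Chars.splitOn body.toList ['|']).foldl
    (fun (s : Option (List Char) × Int × Int × List (List Char)) chunk =>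
      let buf := match s.1 with | none => chunk | some b => b ++ '|' :: chunk
      let br := s.2.1 + (PySem.Chars.count chunk ['[', '['] : Int) - (PySem.Chars.count chunk [']', ']'] : Int)
      let tpl := s.2.2.1 + (PySem.Chars.count chunk ['{', '{'] : Int) - (PySem.Chars.count chunk ['}', '}'] : Int)
      if br = 0 ∧ tpl = 0 then (none, br, tpl, s.2.2.2 ++ [buf])
      else (some buf, br, tpl, s.2.2.2))
    (none, 0, 0, [])
  let parts := match st.1 with | none => st.2.2.2 | some b => st.2.2.2 ++ [b]
  (parts.foldl (fun (d : PySem.Dict String String) part =>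
      match part.dropWhile (· ≠ '=') with                 -- k, eq, v = part.partition("=")
      | [] => d                                           -- eq == "": skip
      | _ :: v => d.insert (String.ofList (PySem.Chars.strip (part.takeWhile (· ≠ '='))))
                           (String.ofList (PySem.Chars.strip v))
    ) PySem.Dict.empty).items

-- ===== PRECONDITION & SPEC =====
def Spec_parse_template_params (body : String) (out : List (String × String)) : Prop := out = parse_template_params_alt body
instance (body : String) (out : List (String × String)) : Decidable (Spec_parse_template_params body out) := by unfold Spec_parse_template_params; infer_instance

-- ===== CLAIM (what is proved, stated in full; the proofs are below) =====
def Claim_equal_parse_template_params : Prop := ∀ (body : String), Dom_parse_template_params body → Spec_parse_template_params body (parse_template_params body)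

-- ===== LEMMAS AND PROOFS =====

-- abbreviations for the two fold bodies and B's loop state
def pvFoldA (d : PySem.Dict String String) (part : List Char) : PySem.Dict String String :=
  if PySem.Chars.isIn ['='] part = false then d
  else
    match PySem.Chars.splitOnMax part ['='] 1 with
    | [k, v] => d.insert (String.ofList (PySem.Chars.strip k)) (String.ofList (PySem.Chars.strip v))
    | _ => d

def pvFoldB (d : PySem.Dict String String) (part : List Char) : PySem.Dict String String :=
  match part.dropWhile (· ≠ '=') with
  | [] => d
  | _ :: v => d.insert (String.ofList (PySem.Chars.strip (part.takeWhile (· ≠ '='))))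
                       (String.ofList (PySem.Chars.strip v))

def pvStepB (s : Option (List Char) × Int × Int × List (List Char)) (chunk : List Char) :
    Option (List Char) × Int × Int × List (List Char) :=
  let buf := match s.1 with | none => chunk | some b => b ++ '|' :: chunk
  let br := s.2.1 + (PySem.Chars.count chunk ['[', '['] : Int) - (PySem.Chars.count chunk [']', ']'] : Int)
  let tpl := s.2.2.1 + (PySem.Chars.count chunk ['{', '{'] : Int) - (PySem.Chars.count chunk ['}', '}'] : Int)
  if br = 0 ∧ tpl = 0 then (none, br, tpl, s.2.2.2 ++ [buf]) else (some buf, br, tpl, s.2.2.2)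

def pvFinishB (s : Option (List Char) × Int × Int × List (List Char)) : List (List Char) :=
  match s.1 with | none => s.2.2.2 | some b => s.2.2.2 ++ [b]

def pvCurOf : Option (List Char) → List Char
  | none => []
  | some b => b ++ ['|']

-- structural characterisation of PySem.Chars.splitOn · ['|']
def pvSplit : List Char → List (List Char)
  | [] => [[]]
  | c :: r => if c = '|' then [] :: pvSplit r else (c :: (pvSplit r).headI) :: (pvSplit r).tail

lemma pvSplit_ne_nil (cs : List Char) : pvSplit cs ≠ [] := by
  cases cs
  · simp [pvSplit]
  · simp [pvSplit]; split <;> simp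

lemma pvHeadI_tail (l : List (List Char)) (h : l ≠ []) : l.headI :: l.tail = l := by
  cases l with
  | nil => exact absurd rfl h
  | cons a t => rfl

lemma splitOn_go_eq (fuel : Nat) : ∀ (l cur : List Char) (acc : List (List Char)),
    l.length < fuel →
    PySem.Chars.splitOn.go ['|'] fuel l cur acc
      = acc.reverse ++ ((cur.reverse ++ (pvSplit l).headI) :: (pvSplit l).tail) := by
  induction fuel with
  | zero => intro l cur acc h; omega
  | succ n ih =>
    intro l cur acc h
    match l with
    | [] => simp [PySem.Chars.splitOn.go, pvSplit]
    | c :: r =>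
      simp only [PySem.Chars.splitOn.go, List.isPrefixOf, Bool.and_true]
      by_cases hc : c = '|'
      · subst hc
        simp only [beq_self_eq_true, if_pos, List.length_singleton, List.drop_succ_cons, List.drop_zero]
        rw [ih r [] (cur.reverse :: acc) (by simp at h ⊢; omega)]
        simp [pvSplit]
        rw [pvHeadI_tail _ (pvSplit_ne_nil r)]
      · have : ('|' == c) = false := by simp [BEq.beq]; exact fun hh => hc hh.symm
        rw [this]
        simp only [Bool.false_eq_true, if_false]
        rw [ih r (c :: cur) acc (by simp at h ⊢; omega)]
        simp [pvSplit, hc]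

lemma splitOn_pipe (cs : List Char) : PySem.Chars.splitOn cs ['|'] = pvSplit cs := by
  show PySem.Chars.splitOn.go ['|'] (cs.length + 1) cs [] [] = _
  rw [splitOn_go_eq (cs.length + 1) cs [] [] (by omega)]
  simp
  cases hs : pvSplit cs with
  | nil => exact absurd hs (pvSplit_ne_nil cs)
  | cons hcons t => simp

-- structural characterisation of PySem.Chars.count · [a, b]
def pvCnt (a b : Char) : List Char → Nat
  | x :: y :: r => if x = a ∧ y = b then 1 + pvCnt a b r else pvCnt a b (y :: r)
  | _ => 0
  termination_by l => l.length

lemma count_go_eq (a b : Char) (fuel : Nat) : ∀ (l : List Char) (acc : Nat),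
    l.length ≤ fuel → PySem.Chars.count.go [a, b] fuel l acc = acc + pvCnt a b l := by
  induction fuel with
  | zero =>
    intro l acc h
    have : l = [] := by cases l <;> simp_all
    subst this
    simp [PySem.Chars.count.go, pvCnt]
  | succ n ih =>
    intro l acc h
    match l with
    | [] => simp [PySem.Chars.count.go, pvCnt]
    | [x] =>
      simp only [PySem.Chars.count.go, List.isPrefixOf, Bool.and_false]
      rw [ih [] acc (by simp)]
      simp [pvCnt]
    | x :: y :: r =>
      simp only [PySem.Chars.count.go, List.isPrefixOf, Bool.and_true]
      by_cases hxy : x = a ∧ y = b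
      · obtain ⟨hx, hy⟩ := hxy
        subst hx; subst hy
        simp only [beq_self_eq_true, Bool.and_self, if_pos, List.length_cons,
          List.drop_succ_cons, List.drop_zero, List.length_nil]
        rw [ih r (acc + 1) (by simp at h ⊢; omega)]
        simp [pvCnt]
        omega
      · have : (a == x && b == y) = false := by
          simp only [Bool.and_eq_false_iff, beq_eq_false_iff_ne]
          by_cases hx : x = a
          · right; intro hc; exact hxy ⟨hx, hc.symm⟩
          · left; intro hc; exact hx hc.symm
        rw [this]
        simp only [Bool.false_eq_true, if_false]
        rw [ih (y :: r) acc (by simp at h ⊢; omega)]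
        rw [pvCnt]
        simp [hxy]

lemma count_pair (a b : Char) (l : List Char) : PySem.Chars.count l [a, b] = pvCnt a b l := by
  show (if ([a, b] : List Char).isEmpty then l.length + 1 else PySem.Chars.count.go [a, b] l.length l 0) = _
  rw [if_neg (by simp)]
  rw [count_go_eq a b l.length l 0 le_rfl]
  simp

lemma pvCnt_skip (a b x : Char) (t : List Char) (hx : x ≠ a) :
    pvCnt a b (x :: t) = pvCnt a b t := by
  match t with
  | [] => simp [pvCnt]
  | y :: r =>
    rw [pvCnt]
    have : ¬ (x = a ∧ y = b) := fun h => hx h.1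
    simp [this]

lemma pvCnt_step (a b c1 c2 : Char) (r : List Char) (h : ¬ (c1 = a ∧ c2 = b)) :
    pvCnt a b (c1 :: c2 :: r) = pvCnt a b (c2 :: r) := by
  rw [pvCnt]; simp [h]

lemma pvCnt_pair (a b : Char) (r : List Char) :
    pvCnt a b (a :: b :: r) = 1 + pvCnt a b r := by
  rw [pvCnt]; simp

-- depth deltas of a chunk, as B computes them
def pvDbr (chunk : List Char) : Int := (pvCnt '[' '[' chunk : Int) - pvCnt ']' ']' chunk
def pvDtpl (chunk : List Char) : Int := (pvCnt '{' '{' chunk : Int) - pvCnt '}' '}' chunk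

-- A's scan over a '|'-free chunk only accumulates the characters and moves each depth
-- by the (non-overlapping) pair counts; holds when what follows is empty or starts '|',
-- so no two-char token straddles the boundary.
lemma chunk_step_n (n : Nat) : ∀ (chunk : List Char), chunk.length ≤ n → '|' ∉ chunk →
    ∀ (rest : List Char), (rest = [] ∨ ∃ rs, rest = '|' :: rs) →
    ∀ br tpl cur parts,
    pvLoopA (chunk ++ rest) br tpl cur parts
      = pvLoopA rest (br + pvDbr chunk) (tpl + pvDtpl chunk) (cur ++ chunk) parts := by
  induction n with
  | zero =>
    intro chunk hlen _ rest _ br tpl cur parts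
    have : chunk = [] := by cases chunk <;> simp_all
    subst this
    simp [pvDbr, pvDtpl, pvCnt]
  | succ n ih =>
    intro chunk hlen hchunk rest hrest br tpl cur parts
    match chunk with
    | [] => simp [pvDbr, pvDtpl, pvCnt]
    | [c] =>
      have hc : c ≠ '|' := by simp at hchunk; exact fun h => hchunk h.symm
      have hΔbr : pvDbr [c] = 0 := by simp [pvDbr, pvCnt]
      have hΔtpl : pvDtpl [c] = 0 := by simp [pvDtpl, pvCnt]
      rcases hrest with rfl | ⟨rs, rfl⟩
      · simp [pvLoopA, hc, hΔbr, hΔtpl]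
      · simp [pvLoopA, hc, hΔbr, hΔtpl]
    | c1 :: c2 :: cr =>
      have hc1 : c1 ≠ '|' := fun h => hchunk (by rw [h]; exact List.mem_cons_self)
      have h2 : '|' ∉ (c2 :: cr) := fun h => hchunk (List.mem_cons_of_mem _ h)
      have hcr : '|' ∉ cr := fun h => h2 (List.mem_cons_of_mem _ h)
      have hlen2 : (c2 :: cr).length ≤ n := by simp at hlen ⊢; omega
      have hlencr : cr.length ≤ n := by simp at hlen ⊢; omega
      rw [show ((c1 :: c2 :: cr) ++ rest : List Char) = c1 :: c2 :: (cr ++ rest) from rfl]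
      by_cases h11 : c1 = '[' ∧ c2 = '['
      · obtain ⟨rfl, rfl⟩ := h11
        have hstep : pvLoopA ('[' :: '[' :: (cr ++ rest)) br tpl cur parts
            = pvLoopA (cr ++ rest) (br + 1) tpl (cur ++ ['[', '[']) parts := by simp [pvLoopA]
        rw [hstep, ih cr hlencr hcr rest hrest]
        have a1 := pvCnt_pair '[' '[' cr
        have a2 : pvCnt ']' ']' ('[' :: '[' :: cr) = pvCnt ']' ']' cr := by
          rw [pvCnt_skip _ _ _ _ (by decide), pvCnt_skip _ _ _ _ (by decide)]
        have a3 : pvCnt '{' '{' ('[' :: '[' :: cr) = pvCnt '{' '{' cr := by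
          rw [pvCnt_skip _ _ _ _ (by decide), pvCnt_skip _ _ _ _ (by decide)]
        have a4 : pvCnt '}' '}' ('[' :: '[' :: cr) = pvCnt '}' '}' cr := by
          rw [pvCnt_skip _ _ _ _ (by decide), pvCnt_skip _ _ _ _ (by decide)]
        have e1 : br + 1 + pvDbr cr = br + pvDbr ('[' :: '[' :: cr) := by
          simp [pvDbr, a1, a2]; ring
        have e2 : tpl + pvDtpl cr = tpl + pvDtpl ('[' :: '[' :: cr) := by
          simp [pvDtpl, a3, a4]
        rw [e1, e2, show (cur ++ ['[', '[']) ++ cr = cur ++ ('[' :: '[' :: cr) by simp]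
      · by_cases h22 : c1 = ']' ∧ c2 = ']'
        · obtain ⟨rfl, rfl⟩ := h22
          have hstep : pvLoopA (']' :: ']' :: (cr ++ rest)) br tpl cur parts
              = pvLoopA (cr ++ rest) (br - 1) tpl (cur ++ [']', ']']) parts := by simp [pvLoopA]
          rw [hstep, ih cr hlencr hcr rest hrest]
          have a1 : pvCnt '[' '[' (']' :: ']' :: cr) = pvCnt '[' '[' cr := by
            rw [pvCnt_skip _ _ _ _ (by decide), pvCnt_skip _ _ _ _ (by decide)]
          have a2 := pvCnt_pair ']' ']' cr
          have a3 : pvCnt '{' '{' (']' :: ']' :: cr) = pvCnt '{' '{' cr := by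
            rw [pvCnt_skip _ _ _ _ (by decide), pvCnt_skip _ _ _ _ (by decide)]
          have a4 : pvCnt '}' '}' (']' :: ']' :: cr) = pvCnt '}' '}' cr := by
            rw [pvCnt_skip _ _ _ _ (by decide), pvCnt_skip _ _ _ _ (by decide)]
          have e1 : br - 1 + pvDbr cr = br + pvDbr (']' :: ']' :: cr) := by
            simp [pvDbr, a1, a2]; ring
          have e2 : tpl + pvDtpl cr = tpl + pvDtpl (']' :: ']' :: cr) := by
            simp [pvDtpl, a3, a4]
          rw [e1, e2, show (cur ++ [']', ']']) ++ cr = cur ++ (']' :: ']' :: cr) by simp]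
        · by_cases h33 : c1 = '{' ∧ c2 = '{'
          · obtain ⟨rfl, rfl⟩ := h33
            have hstep : pvLoopA ('{' :: '{' :: (cr ++ rest)) br tpl cur parts
                = pvLoopA (cr ++ rest) br (tpl + 1) (cur ++ ['{', '{']) parts := by simp [pvLoopA]
            rw [hstep, ih cr hlencr hcr rest hrest]
            have a1 : pvCnt '[' '[' ('{' :: '{' :: cr) = pvCnt '[' '[' cr := by
              rw [pvCnt_skip _ _ _ _ (by decide), pvCnt_skip _ _ _ _ (by decide)]
            have a2 : pvCnt ']' ']' ('{' :: '{' :: cr) = pvCnt ']' ']' cr := by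
              rw [pvCnt_skip _ _ _ _ (by decide), pvCnt_skip _ _ _ _ (by decide)]
            have a3 := pvCnt_pair '{' '{' cr
            have a4 : pvCnt '}' '}' ('{' :: '{' :: cr) = pvCnt '}' '}' cr := by
              rw [pvCnt_skip _ _ _ _ (by decide), pvCnt_skip _ _ _ _ (by decide)]
            have e1 : br + pvDbr cr = br + pvDbr ('{' :: '{' :: cr) := by
              simp [pvDbr, a1, a2]
            have e2 : tpl + 1 + pvDtpl cr = tpl + pvDtpl ('{' :: '{' :: cr) := by
              simp [pvDtpl, a3, a4]; ring
            rw [e1, e2, show (cur ++ ['{', '{']) ++ cr = cur ++ ('{' :: '{' :: cr) by simp]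
          · by_cases h44 : c1 = '}' ∧ c2 = '}'
            · obtain ⟨rfl, rfl⟩ := h44
              have hstep : pvLoopA ('}' :: '}' :: (cr ++ rest)) br tpl cur parts
                  = pvLoopA (cr ++ rest) br (tpl - 1) (cur ++ ['}', '}']) parts := by simp [pvLoopA]
              rw [hstep, ih cr hlencr hcr rest hrest]
              have a1 : pvCnt '[' '[' ('}' :: '}' :: cr) = pvCnt '[' '[' cr := by
                rw [pvCnt_skip _ _ _ _ (by decide), pvCnt_skip _ _ _ _ (by decide)]
              have a2 : pvCnt ']' ']' ('}' :: '}' :: cr) = pvCnt ']' ']' cr := by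
                rw [pvCnt_skip _ _ _ _ (by decide), pvCnt_skip _ _ _ _ (by decide)]
              have a3 : pvCnt '{' '{' ('}' :: '}' :: cr) = pvCnt '{' '{' cr := by
                rw [pvCnt_skip _ _ _ _ (by decide), pvCnt_skip _ _ _ _ (by decide)]
              have a4 := pvCnt_pair '}' '}' cr
              have e1 : br + pvDbr cr = br + pvDbr ('}' :: '}' :: cr) := by
                simp [pvDbr, a1, a2]
              have e2 : tpl - 1 + pvDtpl cr = tpl + pvDtpl ('}' :: '}' :: cr) := by
                simp [pvDtpl, a3, a4]; ring
              rw [e1, e2, show (cur ++ ['}', '}']) ++ cr = cur ++ ('}' :: '}' :: cr) by simp]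
            · have hstep : pvLoopA (c1 :: c2 :: (cr ++ rest)) br tpl cur parts
                  = pvLoopA (c2 :: (cr ++ rest)) br tpl (cur ++ [c1]) parts := by
                rw [pvLoopA]
                simp only [List.take_succ_cons, List.take_zero, List.drop_succ_cons, List.drop_zero]
                rw [if_neg (by simp; intro ha hb; exact h11 ⟨ha, hb⟩),
                    if_neg (by simp; intro ha hb; exact h22 ⟨ha, hb⟩),
                    if_neg (by simp; intro ha hb; exact h33 ⟨ha, hb⟩),
                    if_neg (by simp; intro ha hb; exact h44 ⟨ha, hb⟩),
                    if_neg (by simp; intro ha; exact absurd ha hc1)]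
              rw [hstep, show (c2 :: (cr ++ rest) : List Char) = (c2 :: cr) ++ rest from rfl,
                  ih (c2 :: cr) hlen2 h2 rest hrest]
              have e1 : br + pvDbr (c2 :: cr) = br + pvDbr (c1 :: c2 :: cr) := by
                simp [pvDbr, pvCnt_step _ _ _ _ _ h11, pvCnt_step _ _ _ _ _ h22]
              have e2 : tpl + pvDtpl (c2 :: cr) = tpl + pvDtpl (c1 :: c2 :: cr) := by
                simp [pvDtpl, pvCnt_step _ _ _ _ _ h33, pvCnt_step _ _ _ _ _ h44]
              rw [e1, e2, show (cur ++ [c1]) ++ (c2 :: cr) = cur ++ (c1 :: c2 :: cr) by simp]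

lemma loopA_pipe (rs : List Char) (br tpl : Int) (cur : List Char) (parts : List (List Char)) :
    pvLoopA ('|' :: rs) br tpl cur parts =
      if br = 0 ∧ tpl = 0 then pvLoopA rs br tpl [] (parts ++ [cur])
      else pvLoopA rs br tpl (cur ++ ['|']) parts := by
  rw [pvLoopA]
  by_cases h : br = 0 ∧ tpl = 0 <;> simp [h]

lemma pvSplit_decomp (cs : List Char) :
    pvSplit cs = match cs.dropWhile (· ≠ '|') with
      | [] => [cs]
      | _ :: rs => cs.takeWhile (· ≠ '|') :: pvSplit rs := by
  induction cs with
  | nil => simp [pvSplit]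
  | cons c r ih =>
    by_cases hc : c = '|'
    · subst hc
      simp [pvSplit, List.dropWhile, List.takeWhile]
    · rw [pvSplit]
      simp only [if_neg hc]
      have hd : List.dropWhile (· ≠ '|') (c :: r) = List.dropWhile (· ≠ '|') r := by
        simp [List.dropWhile, hc]
      have ht : List.takeWhile (· ≠ '|') (c :: r) = c :: List.takeWhile (· ≠ '|') r := by
        simp [List.takeWhile, hc]
      rw [hd, ht, ih]
      cases hdw : List.dropWhile (· ≠ '|') r with
      | nil => simp
      | cons x rs => simp

lemma dropWhile_head_pipe : ∀ (cs : List Char) (x : Char) (rs : List Char),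
    List.dropWhile (· ≠ '|') cs = x :: rs → x = '|' := by
  intro cs
  induction cs with
  | nil => intro x rs h; simp at h
  | cons c r ih =>
    intro x rs h
    by_cases hc : c = '|'
    · subst hc
      rw [List.dropWhile_cons_of_neg (by simp)] at h
      exact (List.cons.injEq _ _ _ _ ▸ h).1.symm
    · rw [List.dropWhile_cons_of_pos (by simp [hc])] at h
      exact ih x rs h

lemma takeWhile_no_pipe (cs : List Char) : '|' ∉ cs.takeWhile (· ≠ '|') := by
  intro h
  have := List.mem_takeWhile_imp h
  simp at this

-- a single B step on the last chunk versus A's endgame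
lemma pvBuf_eq (buf : Option (List Char)) (k : List Char) :
    (match buf with | none => k | some b => b ++ '|' :: k) = pvCurOf buf ++ k := by
  cases buf <;> simp [pvCurOf]

lemma stepB_eq (buf : Option (List Char)) (br tpl : Int) (parts : List (List Char)) (k : List Char) :
    pvStepB (buf, br, tpl, parts) k =
      if br + pvDbr k = 0 ∧ tpl + pvDtpl k = 0 then
        (none, br + pvDbr k, tpl + pvDtpl k, parts ++ [pvCurOf buf ++ k])
      else (some (pvCurOf buf ++ k), br + pvDbr k, tpl + pvDtpl k, parts) := by
  unfold pvStepB
  simp only [count_pair, pvBuf_eq]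
  have e1 : br + (pvCnt '[' '[' k : Int) - (pvCnt ']' ']' k : Int) = br + pvDbr k := by
    simp [pvDbr]; ring
  have e2 : tpl + (pvCnt '{' '{' k : Int) - (pvCnt '}' '}' k : Int) = tpl + pvDtpl k := by
    simp [pvDtpl]; ring
  rw [e1, e2]

-- main correspondence: B's parts equal A's parts, up to one trailing empty part of B
lemma main_parts_n (n : Nat) : ∀ (cs : List Char), cs.length ≤ n →
    ∀ (br tpl : Int) (buf : Option (List Char)) (parts : List (List Char)),
    (buf = none → br = 0 ∧ tpl = 0) →
    pvFinishB ((pvSplit cs).foldl pvStepB (buf, br, tpl, parts))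
        = pvLoopA cs br tpl (pvCurOf buf) parts
    ∨ pvFinishB ((pvSplit cs).foldl pvStepB (buf, br, tpl, parts))
        = pvLoopA cs br tpl (pvCurOf buf) parts ++ [[]] := by
  induction n with
  | zero =>
    intro cs hlen br tpl buf parts hinv
    have : cs = [] := by cases cs <;> simp_all
    subst this
    rw [show pvSplit [] = [[]] from rfl]
    simp only [List.foldl_cons, List.foldl_nil, stepB_eq]
    have hΔbr : pvDbr [] = 0 := by simp [pvDbr, pvCnt]
    have hΔtpl : pvDtpl [] = 0 := by simp [pvDtpl, pvCnt]
    rw [hΔbr, hΔtpl]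
    simp only [add_zero, List.append_nil]
    by_cases hz : br = 0 ∧ tpl = 0
    · rw [if_pos hz]
      cases buf with
      | none =>
        right
        simp [pvFinishB, pvCurOf, pvLoopA]
      | some b =>
        left
        simp [pvFinishB, pvCurOf, pvLoopA]
    · rw [if_neg hz]
      cases buf with
      | none => exact absurd (hinv rfl) hz
      | some b =>
        left
        simp [pvFinishB, pvCurOf, pvLoopA]
  | succ n ih =>
    intro cs hlen br tpl buf parts hinv
    rw [pvSplit_decomp cs]
    cases hdw : cs.dropWhile (· ≠ '|') with
    | nil =>
      -- cs contains no '|': single chunk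
      have hk : cs.takeWhile (· ≠ '|') = cs := by
        rw [List.takeWhile_eq_self_iff]
        intro x hx
        have := List.dropWhile_eq_nil_iff.mp hdw x hx
        simpa using this
      have hnp : '|' ∉ cs := by
        intro h
        have := List.dropWhile_eq_nil_iff.mp hdw '|' h
        simp at this
      simp only [List.foldl_cons, List.foldl_nil, stepB_eq]
      have hA : pvLoopA cs br tpl (pvCurOf buf) parts
          = pvLoopA [] (br + pvDbr cs) (tpl + pvDtpl cs) (pvCurOf buf ++ cs) parts := by
        have := chunk_step_n cs.length cs le_rfl hnp [] (Or.inl rfl) br tpl (pvCurOf buf) parts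
        simpa using this
      rw [hA]
      by_cases hz : br + pvDbr cs = 0 ∧ tpl + pvDtpl cs = 0
      · rw [if_pos hz]
        by_cases hne : pvCurOf buf ++ cs = []
        · right
          rw [hne]
          simp [pvFinishB, pvLoopA]
        · left
          simp [pvFinishB, pvLoopA, hne]
      · rw [if_neg hz]
        have hne : pvCurOf buf ++ cs ≠ [] := by
          cases buf with
          | none =>
            obtain ⟨h1, h2⟩ := hinv rfl
            subst h1; subst h2
            intro hcon
            simp [pvCurOf] at hcon
            subst hcon
            simp [pvDbr, pvDtpl, pvCnt] at hz
          | some b => simp [pvCurOf]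
        left
        simp [pvFinishB, pvLoopA, hne]
    | cons x rs =>
      -- cs = k ++ '|' :: rs with k = takeWhile
      have hx : x = '|' := dropWhile_head_pipe cs x rs hdw
      subst hx
      have hcs : cs = cs.takeWhile (· ≠ '|') ++ '|' :: rs := by
        conv_lhs => rw [← List.takeWhile_append_dropWhile (p := (· ≠ '|')) (l := cs), hdw]
      have hlenrs : rs.length ≤ n := by
        have := congrArg List.length hcs
        simp at this
        omega
      simp only [List.foldl_cons, stepB_eq]
      have hA : pvLoopA cs br tpl (pvCurOf buf) parts
          = pvLoopA ('|' :: rs) (br + pvDbr (cs.takeWhile (· ≠ '|'))) (tpl + pvDtpl (cs.takeWhile (· ≠ '|')))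
              (pvCurOf buf ++ cs.takeWhile (· ≠ '|')) parts := by
        conv_lhs => rw [hcs]
        exact chunk_step_n _ _ le_rfl (takeWhile_no_pipe cs) _ (Or.inr ⟨rs, rfl⟩) br tpl _ parts
      rw [hA, loopA_pipe]
      by_cases hz : br + pvDbr (cs.takeWhile (· ≠ '|')) = 0 ∧ tpl + pvDtpl (cs.takeWhile (· ≠ '|')) = 0
      · rw [if_pos hz, if_pos hz]
        have := ih rs hlenrs (br + pvDbr (cs.takeWhile (· ≠ '|'))) (tpl + pvDtpl (cs.takeWhile (· ≠ '|')))
          none (parts ++ [pvCurOf buf ++ cs.takeWhile (· ≠ '|')]) (fun _ => hz)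
        simpa [pvCurOf] using this
      · rw [if_neg hz, if_neg hz]
        have := ih rs hlenrs (br + pvDbr (cs.takeWhile (· ≠ '|'))) (tpl + pvDtpl (cs.takeWhile (· ≠ '|')))
          (some (pvCurOf buf ++ cs.takeWhile (· ≠ '|'))) parts (by simp)
        simpa [pvCurOf] using this

-- the '=' pass: split("=",1) after an "in" check ≡ partition("=")
lemma isIn_eq_dropWhile (part : List Char) :
    PySem.Chars.isIn ['='] part = false ↔ part.dropWhile (· ≠ '=') = [] := by
  rw [PySem.Chars.isIn_eq_false_iff]
  constructor
  · intro hni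
    rw [List.dropWhile_eq_nil_iff]
    intro x hx
    simp only [ne_eq, decide_eq_true_eq]
    intro hxe
    exact hni (by subst hxe; exact ((List.singleton_infix_iff _ _).mpr hx))
  · intro hd hin
    have hmem : '=' ∈ part := hin.mem (by simp : '=' ∈ (['='] : List Char))
    rw [List.dropWhile_eq_nil_iff] at hd
    have := hd '=' hmem
    simp at this

lemma splitOnMax_go0 (fuel : Nat) : ∀ (l cur : List Char) (acc : List (List Char)),
    PySem.Chars.splitOnMax.go ['='] fuel 0 l cur acc = acc.reverse ++ [cur.reverse ++ l] := by
  induction fuel with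
  | zero => intro l cur acc; simp [PySem.Chars.splitOnMax.go]
  | succ n ih =>
    intro l cur acc
    match l with
    | [] => simp [PySem.Chars.splitOnMax.go]
    | c :: r => simp [PySem.Chars.splitOnMax.go]

lemma splitOnMax_go1 (fuel : Nat) : ∀ (l cur : List Char) (acc : List (List Char)),
    l.length < fuel →
    PySem.Chars.splitOnMax.go ['='] fuel 1 l cur acc
      = match l.dropWhile (· ≠ '=') with
        | [] => acc.reverse ++ [cur.reverse ++ l]
        | _ :: v => acc.reverse ++ [cur.reverse ++ l.takeWhile (· ≠ '='), v] := by
  induction fuel with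
  | zero => intro l cur acc h; omega
  | succ n ih =>
    intro l cur acc h
    match l with
    | [] => simp [PySem.Chars.splitOnMax.go]
    | c :: r =>
      simp only [PySem.Chars.splitOnMax.go, List.isPrefixOf, Bool.and_true]
      by_cases hc : c = '='
      · subst hc
        simp only [beq_self_eq_true, if_pos, List.length_singleton, List.drop_succ_cons,
          List.drop_zero, if_neg (by omega : ¬ (1 : Nat) = 0)]
        rw [splitOnMax_go0 n r [] (cur.reverse :: acc)]
        simp [List.dropWhile, List.takeWhile]
      · have hbe : ('=' == c) = false := by simp; exact fun hh => hc hh.symm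
        rw [if_neg (by omega : ¬ (1 : Nat) = 0), hbe]
        simp only [Bool.false_eq_true, if_false]
        rw [ih r (c :: cur) acc (by simp at h ⊢; omega)]
        have hd : List.dropWhile (· ≠ '=') (c :: r) = List.dropWhile (· ≠ '=') r := by
          simp [List.dropWhile, hc]
        have ht : List.takeWhile (· ≠ '=') (c :: r) = c :: List.takeWhile (· ≠ '=') r := by
          simp [List.takeWhile, hc]
        rw [hd, ht]
        cases List.dropWhile (· ≠ '=') r with
        | nil => simp
        | cons x v => simp

lemma splitOnMax_eq1 (part : List Char) :
    PySem.Chars.splitOnMax part ['='] 1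
      = match part.dropWhile (· ≠ '=') with
        | [] => [part]
        | _ :: v => [part.takeWhile (· ≠ '='), v] := by
  show (if (1 : Int) < 0 then _ else PySem.Chars.splitOnMax.go ['='] (part.length + 1) (1 : Int).toNat part [] []) = _
  rw [if_neg (by omega)]
  rw [show ((1 : Int).toNat) = 1 from rfl, splitOnMax_go1 (part.length + 1) part [] [] (by omega)]
  cases part.dropWhile (· ≠ '=') with
  | nil => simp
  | cons x v => simp

lemma params_step_eq (d : PySem.Dict String String) (part : List Char) :
    pvFoldA d part = pvFoldB d part := by
  unfold pvFoldA pvFoldB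
  by_cases h : PySem.Chars.isIn ['='] part = false
  · rw [if_pos h, (isIn_eq_dropWhile part).mp h]
  · rw [if_neg h, splitOnMax_eq1]
    cases hdw : part.dropWhile (· ≠ '=') with
    | nil => exact absurd ((isIn_eq_dropWhile part).mpr hdw) h
    | cons x v => simp

lemma fold_params_eq (partsA partsB : List (List Char))
    (h : partsB = partsA ∨ partsB = partsA ++ [[]]) :
    partsA.foldl pvFoldA PySem.Dict.empty = partsB.foldl pvFoldB PySem.Dict.empty := by
  have hcong : ∀ (l : List (List Char)) (d : PySem.Dict String String),
      l.foldl pvFoldA d = l.foldl pvFoldB d := by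
    intro l d
    exact PySem.List.foldl_congr_mem l pvFoldA pvFoldB d (fun acc x _ => params_step_eq acc x)
  rcases h with rfl | rfl
  · exact hcong _ _
  · rw [List.foldl_append, hcong]
    simp [pvFoldB, List.dropWhile]

-- ===== VERDICT (by name: the statement is the Claim_ definition above) =====
theorem parse_template_params_spec : Claim_equal_parse_template_params := by
  intro body _
  show parse_template_params body = parse_template_params_alt body
  have hA : parse_template_params body
      = ((pvLoopA body.toList 0 0 [] []).foldl pvFoldA PySem.Dict.empty).items := rfl
  have hB : parse_template_params_alt body
      = ((pvFinishB ((PySem.Chars.splitOn body.toList ['|']).foldl pvStepB (none, 0, 0, []))).foldl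
          pvFoldB PySem.Dict.empty).items := rfl
  rw [hA, hB, splitOn_pipe]
  have hmain := main_parts_n body.toList.length body.toList le_rfl 0 0 none [] (fun _ => ⟨rfl, rfl⟩)
  rw [show pvCurOf none = [] from rfl] at hmain
  rw [fold_params_eq (pvLoopA body.toList 0 0 [] []) _ (by tauto)]
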